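-- pv_equiv track=rewrite | github.com/ousidus/AI-Terminal-Assistant | rag_store.py | get_safety_level
-- ===== SOURCE A (Python) =====
-- def get_safety_level(command: str) -> int:
--     """Analyze command safety level"""
--     dangerous_patterns = {
--         5: ['rm -rf', 'mkfs', 'dd if=', 'format', 'fdisk', '>/dev/'],
--         4: ['kill -9', 'pkill', 'killall', 'sudo rm', 'chmod 777'],
--         3: ['sudo', 'mv', 'cp -r', 'chown', 'chmod'],
--         2: ['rm', 'rmdir', 'unzip', 'tar -x']
--     }
--
--     command_lower = command.lower()
--     for level, patterns in dangerous_patterns.items():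
--         for pattern in patterns:
--             if pattern in command_lower:
--                 return level
--
--     return 1  # Safe by default
-- ===== SOURCE B (Python) =====
-- _PATTERNS = [
--     ("rm -rf", 5), ("mkfs", 5), ("dd if=", 5), ("format", 5), ("fdisk", 5), (">/dev/", 5),
--     ("kill -9", 4), ("pkill", 4), ("killall", 4), ("sudo rm", 4), ("chmod 777", 4),
--     ("sudo", 3), ("mv", 3), ("cp -r", 3), ("chown", 3), ("chmod", 3),
--     ("rm", 2), ("rmdir", 2), ("unzip", 2), ("tar -x", 2),
-- ]
--
-- def get_safety_level(command: str) -> int: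
--     """Analyze command safety level"""
--     cl = command.lower()
--     best = 1
--     for i in range(len(cl) + 1):
--         for pat, lvl in _PATTERNS:
--             if cl.startswith(pat, i):
--                 best = max(best, lvl)
--     return best
-- ===== Notes on version B (the rewrite author's own statement) =====
-- stated objective: alternative
-- what changed: Replaces the per-pattern substring membership tests (nested dict loops with early return) by a single left-to-right sweep over the command's positions: at each index it checks which patterns start there and keeps a running maximum level, defaulting to 1.
import Mathlib
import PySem

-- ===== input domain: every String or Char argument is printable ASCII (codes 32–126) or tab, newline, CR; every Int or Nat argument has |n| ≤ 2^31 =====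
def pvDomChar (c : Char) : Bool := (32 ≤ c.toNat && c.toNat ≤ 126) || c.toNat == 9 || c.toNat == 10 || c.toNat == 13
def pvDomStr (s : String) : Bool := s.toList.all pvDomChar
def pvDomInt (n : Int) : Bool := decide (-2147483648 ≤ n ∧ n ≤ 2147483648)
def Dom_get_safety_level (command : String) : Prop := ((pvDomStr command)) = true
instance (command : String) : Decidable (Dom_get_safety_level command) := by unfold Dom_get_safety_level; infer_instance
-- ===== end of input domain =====

-- B replaces A's per-pattern substring tests (nested dict loops with early return) by a
-- left-to-right sweep over the command's positions keeping a running maximum level; objective: alternative.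


-- ===== PORT A =====
-- the literal dict {level: [patterns]} in insertion order
def gslDict : List (Int × List String) :=
  [(5, ["rm -rf", "mkfs", "dd if=", "format", "fdisk", ">/dev/"]),
   (4, ["kill -9", "pkill", "killall", "sudo rm", "chmod 777"]),
   (3, ["sudo", "mv", "cp -r", "chown", "chmod"]),
   (2, ["rm", "rmdir", "unzip", "tar -x"])]

-- inner loop: "for pattern in patterns: if pattern in command_lower: return level"
def gslInnerA (level : Int) (patterns : List String) (cl : String) : Option Int :=
  match patterns with
  | [] => none
  | p :: ps => if PySem.Str.isIn p cl then some level else gslInnerA level ps cl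

-- outer loop: "for level, patterns in dangerous_patterns.items(): …  return 1"
def gslOuterA (items : List (Int × List String)) (cl : String) : Int :=
  match items with
  | [] => 1
  | (level, patterns) :: rest =>
    match gslInnerA level patterns cl with
    | some r => r
    | none => gslOuterA rest cl

def get_safety_level (command : String) : Int :=
  gslOuterA gslDict (PySem.Str.lower command)

-- ===== PORT B =====
-- the flat _PATTERNS table of Source B, as character lists
def gslFlat : List (List Char × Int) :=
  [("rm -rf".toList, 5), ("mkfs".toList, 5), ("dd if=".toList, 5), ("format".toList, 5),
   ("fdisk".toList, 5), (">/dev/".toList, 5),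
   ("kill -9".toList, 4), ("pkill".toList, 4), ("killall".toList, 4), ("sudo rm".toList, 4),
   ("chmod 777".toList, 4),
   ("sudo".toList, 3), ("mv".toList, 3), ("cp -r".toList, 3), ("chown".toList, 3),
   ("chmod".toList, 3),
   ("rm".toList, 2), ("rmdir".toList, 2), ("unzip".toList, 2), ("tar -x".toList, 2)]

-- Source B: sweep i over range(len(cl)+1); cl.startswith(pat, i) is exact as
-- PySem.Chars.startswith (cl.drop i) pat for 0 ≤ i ≤ len(cl)
def get_safety_level_alt (command : String) : Int :=
  let cl := (PySem.Str.lower command).toList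
  (List.range (cl.length + 1)).foldl
    (fun best i =>
      gslFlat.foldl
        (fun b pl => if PySem.Chars.startswith (cl.drop i) pl.1 then max b pl.2 else b) best)
    1

-- ===== PRECONDITION & SPEC =====
def Spec_get_safety_level (command : String) (out : Int) : Prop := out = get_safety_level_alt command
instance (command : String) (out : Int) : Decidable (Spec_get_safety_level command out) := by unfold Spec_get_safety_level; infer_instance

-- ===== CLAIM (what is proved, stated in full; the proofs are below) =====
def Claim_equal_get_safety_level : Prop := ∀ (command : String), Dom_get_safety_level command → Spec_get_safety_level command (get_safety_level command)

-- ===== LEMMAS AND PROOFS =====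

-- the four level groups, as char-list patterns
def gslP5 : List (List Char) := ["rm -rf".toList, "mkfs".toList, "dd if=".toList, "format".toList, "fdisk".toList, ">/dev/".toList]
def gslP4 : List (List Char) := ["kill -9".toList, "pkill".toList, "killall".toList, "sudo rm".toList, "chmod 777".toList]
def gslP3 : List (List Char) := ["sudo".toList, "mv".toList, "cp -r".toList, "chown".toList, "chmod".toList]
def gslP2 : List (List Char) := ["rm".toList, "rmdir".toList, "unzip".toList, "tar -x".toList]

-- descending-if-chain on four booleans
def gslNif (a b c d : Bool) : Int :=
  if a then 5 else if b then 4 else if c then 3 else if d then 2 else 1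

-- group k matches at suffix s
def gslSw (pats : List (List Char)) (s : List Char) : Bool :=
  pats.any (fun p => PySem.Chars.startswith s p)

-- group k matches somewhere in the first n positions
def gslSW (pats : List (List Char)) (cl : List Char) (n : Nat) : Bool :=
  (List.range n).any (fun i => gslSw pats (cl.drop i))

theorem gslInnerA_eq_any (level : Int) (patterns : List String) (cl : String) :
    gslInnerA level patterns cl
      = (if patterns.any (fun p => PySem.Str.isIn p cl) then some level else none) := by
  induction patterns with
  | nil => rfl
  | cons p ps ih =>
    rw [gslInnerA, ih, List.any_cons]
    cases h : PySem.Str.isIn p cl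
    · rw [if_neg Bool.false_ne_true, Bool.false_or]
    · rw [if_pos rfl, Bool.true_or, if_pos rfl]

-- fold of the max-if step over one constant-level group
theorem gsl_group_fold (pats : List (List Char)) (L : Int) (s : List Char) (b : Int) :
    (pats.map (fun p => (p, L))).foldl
        (fun b pl => if PySem.Chars.startswith s pl.1 then max b pl.2 else b) b
      = if pats.any (fun p => PySem.Chars.startswith s p) then max b L else b := by
  induction pats generalizing b with
  | nil => simp
  | cons p ps ih =>
    simp only [List.map_cons, List.foldl_cons, List.any_cons, ih]
    by_cases h : PySem.Chars.startswith s p = true <;>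
      by_cases h2 : (ps.any fun p => PySem.Chars.startswith s p) = true <;>
      simp [h, h2]

-- the inner fold over the full flat table, from any start ≥ 1
theorem gsl_inner_fold (s : List Char) (b : Int) (hb : 1 ≤ b) :
    gslFlat.foldl (fun b pl => if PySem.Chars.startswith s pl.1 then max b pl.2 else b) b
      = max b (gslNif (gslSw gslP5 s) (gslSw gslP4 s) (gslSw gslP3 s) (gslSw gslP2 s)) := by
  have hsplit : gslFlat = (gslP5.map (fun p => (p, (5:Int)))) ++ (gslP4.map (fun p => (p, (4:Int))))
      ++ (gslP3.map (fun p => (p, (3:Int)))) ++ (gslP2.map (fun p => (p, (2:Int)))) := by rfl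
  rw [hsplit, List.foldl_append, List.foldl_append, List.foldl_append,
    gsl_group_fold, gsl_group_fold, gsl_group_fold, gsl_group_fold]
  unfold gslNif gslSw
  cases h5 : gslP5.any (fun p => PySem.Chars.startswith s p) <;>
    cases h4 : gslP4.any (fun p => PySem.Chars.startswith s p) <;>
    cases h3 : gslP3.any (fun p => PySem.Chars.startswith s p) <;>
    cases h2 : gslP2.any (fun p => PySem.Chars.startswith s p) <;>
    simp [max_def] <;> omega

theorem gsl_nif_ge_one (a b c d : Bool) : 1 ≤ gslNif a b c d := by
  cases a <;> cases b <;> cases c <;> cases d <;> decide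

theorem gsl_max_nif (a b c d a' b' c' d' : Bool) :
    max (gslNif a b c d) (gslNif a' b' c' d')
      = gslNif (a || a') (b || b') (c || c') (d || d') := by
  cases a <;> cases b <;> cases c <;> cases d <;>
    cases a' <;> cases b' <;> cases c' <;> cases d' <;> decide

-- the outer sweep computes the if-chain over the first-n-positions booleans
theorem gsl_outer_fold (cl : List Char) (n : Nat) :
    (List.range n).foldl
      (fun best i =>
        gslFlat.foldl
          (fun b pl => if PySem.Chars.startswith (cl.drop i) pl.1 then max b pl.2 else b) best)
      1
    = gslNif (gslSW gslP5 cl n) (gslSW gslP4 cl n) (gslSW gslP3 cl n) (gslSW gslP2 cl n) := by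
  induction n with
  | zero => simp [gslSW, gslNif]
  | succ n ih =>
    rw [List.range_succ, List.foldl_append, List.foldl_cons, List.foldl_nil, ih,
      gsl_inner_fold _ _ (gsl_nif_ge_one _ _ _ _), gsl_max_nif]
    simp [gslSW, List.range_succ]

-- a bounded position sweep finds exactly the infix occurrences
theorem gsl_SW_eq_isIn (pats : List (List Char)) (cl : List Char) :
    gslSW pats cl (cl.length + 1) = pats.any (fun p => PySem.Chars.isIn p cl) := by
  unfold gslSW gslSw
  rw [Bool.eq_iff_iff]
  simp only [List.any_eq_true, List.mem_range]
  constructor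
  · rintro ⟨i, _, p, hp, hs⟩
    refine ⟨p, hp, ?_⟩
    rw [← PySem.Chars.exists_prefix_drop_iff_isIn]
    exact ⟨i, (PySem.Chars.startswith_iff _ _).mp hs⟩
  · rintro ⟨p, hp, hIn⟩
    obtain ⟨j, hj⟩ := (PySem.Chars.exists_prefix_drop_iff_isIn p cl).mpr hIn
    by_cases hle : j ≤ cl.length
    · exact ⟨j, by omega, p, hp, (PySem.Chars.startswith_iff _ _).mpr hj⟩
    · refine ⟨cl.length, by omega, p, hp, (PySem.Chars.startswith_iff _ _).mpr ?_⟩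
      have h1 : cl.drop j = [] := List.drop_eq_nil_of_le (by omega)
      have h2 : cl.drop cl.length = [] := by simp
      rw [h2, ← h1]; exact hj

-- String-level group match equals char-level group match on the lowered command
theorem gsl_str_any (ps : List String) (cps : List (List Char)) (hmap : cps = ps.map String.toList)
    (cl : String) :
    ps.any (fun p => PySem.Str.isIn p cl) = cps.any (fun p => PySem.Chars.isIn p cl.toList) := by
  subst hmap
  induction ps with
  | nil => rfl
  | cons p ps ih =>
    simp only [List.map_cons, List.any_cons, ih, List.any_map]
    simp [PySem.Str.isIn, Function.comp_def]

-- ===== VERDICT (by name: the statement is the Claim_ definition above) =====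
theorem get_safety_level_spec : Claim_equal_get_safety_level := by
  intro command _
  unfold Spec_get_safety_level get_safety_level get_safety_level_alt
  rw [gsl_outer_fold, gsl_SW_eq_isIn, gsl_SW_eq_isIn, gsl_SW_eq_isIn, gsl_SW_eq_isIn]
  simp only [gslDict, gslOuterA, gslInnerA_eq_any]
  rw [gsl_str_any (cps := gslP5) (hmap := rfl) _ (PySem.Str.lower command),
    gsl_str_any (cps := gslP4) (hmap := rfl) _ (PySem.Str.lower command),
    gsl_str_any (cps := gslP3) (hmap := rfl) _ (PySem.Str.lower command),
    gsl_str_any (cps := gslP2) (hmap := rfl) _ (PySem.Str.lower command)]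
  unfold gslNif
  cases h5 : gslP5.any (fun p => PySem.Chars.isIn p (PySem.Str.lower command).toList) <;>
    cases h4 : gslP4.any (fun p => PySem.Chars.isIn p (PySem.Str.lower command).toList) <;>
    cases h3 : gslP3.any (fun p => PySem.Chars.isIn p (PySem.Str.lower command).toList) <;>
    cases h2 : gslP2.any (fun p => PySem.Chars.isIn p (PySem.Str.lower command).toList) <;>
    simp
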